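-- pv_equiv track=rewrite | github.com/pypi-data/pypi-mirror-30 | packages/kostal-ardexa/kostal_ardexa-0.1.1-py3-none-any.whl/kostal_ardexa.py | formulate_request
-- ===== SOURCE A (Python) =====
-- def formulate_request(code, address):
--     """Formulate the request, which includes the checksum"""
--     request = '\x62%s\x03%s\x00%s' % (chr(address), chr(address), chr(code))
--     checksum = 0
--     for i in range(len(request)):
--         checksum -= ord(request[i])
--         checksum %= 256
--     request += '%s\x00' % (chr(checksum))
--     return request
-- ===== SOURCE B (Python) =====
-- def formulate_request(code, address):
--     """Formulate the request, which includes the checksum"""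
--     # closed-form negative-sum checksum over the known frame bytes
--     checksum = (-(0x62 + 0x03 + 2 * address + code)) % 256
--     frame = [0x62, address, 0x03, address, 0x00, code, checksum, 0x00]
--     return ''.join(map(chr, frame))
-- ===== Notes on version B (the rewrite author's own statement) =====
-- stated objective: simpler
-- what changed: B builds the whole frame as a list of byte values joined with chr at the end and computes the checksum in closed form (-(0x62+0x03+2*address+code)) % 256, instead of A's format-string concatenation plus a per-character subtract-and-mod loop over the built string.
import Mathlib
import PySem

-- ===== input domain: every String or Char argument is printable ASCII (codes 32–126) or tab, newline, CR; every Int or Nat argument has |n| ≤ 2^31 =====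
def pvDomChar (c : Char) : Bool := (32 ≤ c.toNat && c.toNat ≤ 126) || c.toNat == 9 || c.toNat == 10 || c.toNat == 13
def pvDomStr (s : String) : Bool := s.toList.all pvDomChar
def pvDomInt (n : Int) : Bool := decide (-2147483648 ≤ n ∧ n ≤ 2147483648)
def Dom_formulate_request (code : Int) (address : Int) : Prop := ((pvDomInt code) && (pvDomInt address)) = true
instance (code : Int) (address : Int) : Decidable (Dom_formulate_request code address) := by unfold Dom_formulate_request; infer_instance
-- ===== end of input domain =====

-- B builds the frame as a list of byte values joined at the end, with the checksum computed by one
-- closed-form modular expression instead of A's per-character subtract-and-mod loop; simpler.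
-- chr(n): exact for every non-surrogate codepoint 0 ≤ n < 0x110000 (guaranteed by Pre_); Python raises outside 0..0x10FFFF.
def pyChr (n : Int) : Char := Char.ofNat n.toNat
-- ord(c): exact.
def pyOrd (c : Char) : Int := (c.toNat : Int)

-- ===== PORT A =====
def formulate_request (code : Int) (address : Int) : String :=
  -- request = '\x62%s\x03%s\x00%s' % (chr(address), chr(address), chr(code))
  let request : List Char :=
    [Char.ofNat 0x62] ++ [pyChr address] ++ [Char.ofNat 0x03] ++ [pyChr address]
      ++ [Char.ofNat 0x00] ++ [pyChr code]
  -- for i in range(len(request)): checksum -= ord(request[i]); checksum %= 256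
  let checksum : Int :=
    (PySem.List.pyRange 0 (request.length : Int) 1).foldl
      (fun checksum i => PySem.Int.mod (checksum - pyOrd (PySem.List.pyGetD request i ' ')) 256) 0
  -- request += '%s\x00' % (chr(checksum))
  String.ofList (request ++ [pyChr checksum] ++ [Char.ofNat 0x00])

-- ===== PORT B =====
def formulate_request_alt (code : Int) (address : Int) : String :=
  -- checksum = (-(0x62 + 0x03 + 2 * address + code)) % 256
  let checksum : Int := PySem.Int.mod (-(0x62 + 0x03 + 2 * address + code)) 256
  -- frame = [0x62, address, 0x03, address, 0x00, code, checksum, 0x00]; ''.join(map(chr, frame))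
  let frame : List Int := [0x62, address, 0x03, address, 0x00, code, checksum, 0x00]
  String.ofList (frame.map pyChr)

-- ===== PRECONDITION & SPEC =====
-- Pre_ excludes arguments outside chr's range 0..0x10FFFF (A raises ValueError there) and lone UTF-16
-- surrogate codepoints, where A returns a str containing a lone surrogate — not representable as a Lean String.
def Pre_formulate_request (code : Int) (address : Int) : Prop :=
  (0 ≤ code ∧ code < 1114112 ∧ ¬(55296 ≤ code ∧ code < 57344)) ∧
  (0 ≤ address ∧ address < 1114112 ∧ ¬(55296 ≤ address ∧ address < 57344))
instance (code : Int) (address : Int) : Decidable (Pre_formulate_request code address) := by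
  unfold Pre_formulate_request; infer_instance
def pvWitness_formulate_request : Int × Int := (3, 5)
def Spec_formulate_request (code : Int) (address : Int) (out : String) : Prop := out = formulate_request_alt code address
instance (code : Int) (address : Int) (out : String) : Decidable (Spec_formulate_request code address out) := by unfold Spec_formulate_request; infer_instance

-- ===== CLAIM (what is proved, stated in full; the proofs are below) =====
def Claim_equal_formulate_request : Prop := ∀ (code : Int) (address : Int), Dom_formulate_request code address → Pre_formulate_request code address → Spec_formulate_request code address (formulate_request code address)

-- ===== LEMMAS AND PROOFS =====
theorem pyOrd_pyChr (n : Int) (h0 : 0 ≤ n) (h1 : n < 1114112)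
    (h2 : ¬(55296 ≤ n ∧ n < 57344)) : pyOrd (pyChr n) = n := by
  have hv : Nat.isValidChar n.toNat := by
    unfold Nat.isValidChar
    omega
  simp [pyOrd, pyChr, Char.ofNat, hv, Char.ofNatAux]
  omega

-- ===== VERDICT (by name: the statement is the Claim_ definition above) =====
theorem formulate_request_spec : Claim_equal_formulate_request := by
  intro code address _ hpre
  obtain ⟨⟨hc0, hc1, hc2⟩, ha0, ha1, ha2⟩ := hpre
  have hc := pyOrd_pyChr code hc0 hc1 hc2
  have ha := pyOrd_pyChr address ha0 ha1 ha2
  unfold Spec_formulate_request formulate_request formulate_request_alt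
  simp only [List.cons_append, List.length_cons, List.map_cons, List.map_nil]
  have hr : PySem.List.pyRange 0 (6 : Int) 1 = [0, 1, 2, 3, 4, 5] := by decide
  have h98 : pyOrd (Char.ofNat 98) = 98 := by decide
  have h3 : pyOrd (Char.ofNat 3) = 3 := by decide
  have h0 : pyOrd (Char.ofNat 0) = 0 := by decide
  have t2 : (2 : Int).toNat = 2 := rfl
  have t3 : (3 : Int).toNat = 3 := rfl
  have t4 : (4 : Int).toNat = 4 := rfl
  have t5 : (5 : Int).toNat = 5 := rfl
  norm_num [hr, List.foldl, PySem.List.pyGetD, PySem.List.pyGet?, PySem.List.pyIdx?,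
    PySem.Int.mod_eq_emod_of_pos, hc, ha, h98, h3, h0, t2, t3, t4, t5,
    List.getElem_cons_succ, List.getElem_cons_zero]
  congr 1
  simp only [List.cons.injEq, and_true, true_and]
  and_intros <;> first | rfl | decide | exact congrArg pyChr (by omega)
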